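-- pv_equiv track=rewrite | github.com/schrodingerskatt/DSA-Problems | Company wise/VISA/AB_two_cities.py | flight_time
-- ===== SOURCE A (Python) =====
-- from bisect import bisect_left
--
-- def flight_time(a2b, b2a, n):
--     a2b.sort()
--     b2a.sort()
--     def flight(timetable, time):
--         if(time == -1):
--             return -1
--         i = bisect_left(timetable, time)
--         return timetable[i]+100 if (i < len(timetable)) else -1
--     time = 0
--     for _ in range(n):
--         time = flight(a2b, time)
--         time = flight(b2a, time)
--     return time
-- ===== SOURCE B (Python) =====
-- def flight_time(a2b, b2a, n):
--     a2b.sort()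
--     b2a.sort()
--     la, lb = len(a2b), len(b2a)
--     time, i, j, r = 0, 0, 0, 0
--     while r < n:
--         while i < la and a2b[i] < time:
--             i += 1
--         if i == la:
--             return -1
--         t = a2b[i] + 100
--         while j < lb and b2a[j] < t:
--             j += 1
--         if j == lb:
--             return -1
--         time = b2a[j] + 100
--         r += 1
--     return time
-- ===== Notes on version B (the rewrite author's own statement) =====
-- stated objective: alternative
-- what changed: Replaces the n-round simulation doing a fresh binary search over the full timetables each round by a single two-pointer sweep whose pointers never reset and which exits as soon as a timetable is exhausted, so it runs at most min(n, len(b2a)+1) rounds instead of always n.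
import Mathlib
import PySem

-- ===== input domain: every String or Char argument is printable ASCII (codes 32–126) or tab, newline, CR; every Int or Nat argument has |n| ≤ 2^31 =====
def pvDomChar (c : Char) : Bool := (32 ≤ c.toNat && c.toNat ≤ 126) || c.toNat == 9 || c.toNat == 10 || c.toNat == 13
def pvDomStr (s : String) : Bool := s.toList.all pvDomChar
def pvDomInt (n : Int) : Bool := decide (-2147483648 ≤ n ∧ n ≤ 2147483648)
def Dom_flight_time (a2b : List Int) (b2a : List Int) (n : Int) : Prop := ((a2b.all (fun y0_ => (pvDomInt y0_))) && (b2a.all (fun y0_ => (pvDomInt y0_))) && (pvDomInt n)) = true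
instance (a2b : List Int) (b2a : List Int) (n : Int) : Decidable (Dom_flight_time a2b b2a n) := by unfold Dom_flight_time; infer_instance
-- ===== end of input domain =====

-- B replaces A's per-round binary search over the full timetables by a two-pointer sweep
-- (never-resetting pointers, early exit once a timetable is exhausted) — an alternative
-- algorithm; both Pythons sort the argument lists in place, so side effects coincide too.


-- ===== PORT A =====
-- the inner helper 'flight(timetable, time)' of A; bisect_left is PySem.List.bisectLeft
def pvFlightA (timetable : List Int) (time : Int) : Int :=
  if time = -1 then -1
  else
    let i := PySem.List.bisectLeft timetable time
    if i < timetable.length then timetable.getD i 0 + 100 else -1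

def flight_time (a2b : List Int) (b2a : List Int) (n : Int) : Int :=
  let a := PySem.List.sorted a2b (fun x => x) false
  let b := PySem.List.sorted b2a (fun x => x) false
  (PySem.List.pyRange 0 n 1).foldl (fun time _ => pvFlightA b (pvFlightA a time)) 0

-- ===== PORT B =====
-- B's while loop; the two advancing pointers i, j are represented by the remaining
-- suffixes of the sorted lists (pointer advance 'while lst[i] < t: i += 1' = dropWhile)
def pvLoopB : List Int → List Int → Nat → Int → Int
  | _, _, 0, time => time
  | a, b, Nat.succ k, time =>
    match a.dropWhile (fun x => decide (x < time)) with
    | [] => -1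
    | x :: r =>
      match b.dropWhile (fun y => decide (y < x + 100)) with
      | [] => -1
      | y :: s => pvLoopB (x :: r) (y :: s) k (y + 100)

def flight_time_alt (a2b : List Int) (b2a : List Int) (n : Int) : Int :=
  pvLoopB (PySem.List.sorted a2b (fun x => x) false) (PySem.List.sorted b2a (fun x => x) false) n.toNat 0

-- ===== PRECONDITION & SPEC =====
def Spec_flight_time (a2b : List Int) (b2a : List Int) (n : Int) (out : Int) : Prop := out = flight_time_alt a2b b2a n
instance (a2b : List Int) (b2a : List Int) (n : Int) (out : Int) : Decidable (Spec_flight_time a2b b2a n out) := by unfold Spec_flight_time; infer_instance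

-- ===== CLAIM (what is proved, stated in full; the proofs are below) =====
def Claim_equal_flight_time : Prop := ∀ (a2b : List Int) (b2a : List Int) (n : Int), Dom_flight_time a2b b2a n → Spec_flight_time a2b b2a n (flight_time a2b b2a n)

-- ===== LEMMAS AND PROOFS =====

-- one round of A as a function of the time
def pvStep (a b : List Int) (t : Int) : Int := pvFlightA b (pvFlightA a t)

theorem pvFoldl_const_eq_iterate {α : Type} (l : List α) (f : Int → Int) (init : Int) :
    l.foldl (fun t _ => f t) init = f^[l.length] init := by
  induction l generalizing init with
  | nil => rfl
  | cons x xs ih => simp [List.foldl, ih, Function.iterate_succ_apply]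

theorem pvDropWhile_eq_drop (p : Int → Bool) (a : List Int) (i : Nat)
    (hle : i ≤ a.length)
    (hlt : ∀ j (hj : j < a.length), j < i → p a[j] = true)
    (hge : ∀ (hi : i < a.length), p a[i] = false) :
    a.dropWhile p = a.drop i := by
  induction a generalizing i with
  | nil => simp
  | cons x xs ih =>
    cases i with
    | zero =>
      have hx : p x = false := hge (by simp)
      simp [List.dropWhile, hx]
    | succ k =>
      have hx : p x = true := hlt 0 (by simp) (Nat.succ_pos k)
      simp only [List.dropWhile, hx, List.drop_succ_cons]
      exact ih k (by simpa using hle)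
        (fun j hj hjk => by simpa using hlt (j+1) (by simpa using Nat.succ_lt_succ hj) (Nat.succ_lt_succ hjk))
        (fun hk => by simpa using hge (by simpa using Nat.succ_lt_succ hk))

-- A's flight on a sorted list, phrased through dropWhile
theorem pvFlightA_eq_dropWhile (a : List Int) (t : Int)
    (hs : a.Pairwise (fun x y => x ≤ y)) (ht : t ≠ -1) :
    pvFlightA a t =
      match a.dropWhile (fun x => decide (x < t)) with
      | [] => -1
      | x :: _ => x + 100 := by
  obtain ⟨h1, h2, h3⟩ := PySem.List.bisectLeft_spec a t hs
  have hdrop : a.dropWhile (fun x => decide (x < t)) = a.drop (PySem.List.bisectLeft a t) := by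
    refine pvDropWhile_eq_drop _ a _ h1 ?_ ?_
    · intro j hj hjlt; simpa using h2 j hj hjlt
    · intro hi; simpa using not_lt.mpr (h3 _ hi le_rfl)
  rw [hdrop]
  by_cases hib : PySem.List.bisectLeft a t < a.length
  · have hgd : a.getD (PySem.List.bisectLeft a t) 0 = a[PySem.List.bisectLeft a t] := List.getD_eq_getElem a 0 hib
    rw [List.drop_eq_getElem_cons hib]
    simp [pvFlightA, ht, hib]
  · have : a.drop (PySem.List.bisectLeft a t) = [] := List.drop_eq_nil_of_le (le_of_not_gt hib)
    rw [this]
    simp [pvFlightA, ht, hib]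

theorem pvDropWhile_dropWhile (l : List Int) (t s : Int) (hts : t ≤ s) :
    (l.dropWhile (fun x => decide (x < t))).dropWhile (fun x => decide (x < s))
      = l.dropWhile (fun x => decide (x < s)) := by
  induction l with
  | nil => simp
  | cons x xs ih =>
    by_cases hx : x < t
    · have hxs : x < s := lt_of_lt_of_le hx hts
      simp [List.dropWhile, hx, hxs, ih]
    · simp [List.dropWhile, hx]

theorem pvHead_dropWhile_false (p : Int → Bool) (l : List Int) (x : Int) (r : List Int)
    (h : l.dropWhile p = x :: r) : p x = false := by
  induction l with
  | nil => simp at h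
  | cons a as ih =>
    by_cases ha : p a = true
    · exact ih (by simpa [List.dropWhile, ha] using h)
    · simp only [List.dropWhile, ha] at h
      obtain ⟨rfl, -⟩ := List.cons.inj h
      simpa using ha

theorem pvStep_neg (a b : List Int) : pvStep a b (-1) = -1 := by
  simp [pvStep, pvFlightA]

theorem pvIterate_neg (a b : List Int) (k : Nat) : (pvStep a b)^[k] (-1) = -1 :=
  Function.iterate_fixed (pvStep_neg a b) k

theorem pvLoopB_eq_iterate (k : Nat) (a0 b0 a b : List Int) (t : Int)
    (hsa : a0.Pairwise (fun x y => x ≤ y)) (hsb : b0.Pairwise (fun x y => x ≤ y))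
    (ht : 0 ≤ t)
    (hA : ∀ s, t ≤ s → a0.dropWhile (fun x => decide (x < s)) = a.dropWhile (fun x => decide (x < s)))
    (hB : ∀ s, t ≤ s → b0.dropWhile (fun x => decide (x < s)) = b.dropWhile (fun x => decide (x < s))) :
    pvLoopB a b k t = (pvStep a0 b0)^[k] t := by
  induction k generalizing a b t with
  | zero => rfl
  | succ k ih =>
    have htne : t ≠ -1 := by omega
    rw [Function.iterate_succ_apply]
    rcases ha : a.dropWhile (fun x => decide (x < t)) with _ | ⟨x, r⟩
    · have hstep : pvStep a0 b0 t = -1 := by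
        unfold pvStep
        rw [pvFlightA_eq_dropWhile a0 t hsa htne, hA t le_rfl, ha]
        simp [pvFlightA]
      rw [hstep, pvIterate_neg]
      simp [pvLoopB, ha]
    · have hxt : t ≤ x := by
        have := pvHead_dropWhile_false _ _ _ _ ha
        simpa using this
      have hfA : pvFlightA a0 t = x + 100 := by
        rw [pvFlightA_eq_dropWhile a0 t hsa htne, hA t le_rfl, ha]
      rcases hb : b.dropWhile (fun y => decide (y < x + 100)) with _ | ⟨y, s'⟩
      · have hstep : pvStep a0 b0 t = -1 := by
          unfold pvStep
          rw [hfA, pvFlightA_eq_dropWhile b0 (x + 100) hsb (by omega),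
            hB (x + 100) (by omega), hb]
        rw [hstep, pvIterate_neg]
        simp [pvLoopB, ha, hb]
      · have hyx : x + 100 ≤ y := by
          have := pvHead_dropWhile_false _ _ _ _ hb
          simpa using this
        have hstep : pvStep a0 b0 t = y + 100 := by
          unfold pvStep
          rw [hfA, pvFlightA_eq_dropWhile b0 (x + 100) hsb (by omega),
            hB (x + 100) (by omega), hb]
        rw [hstep]
        have hrec : pvLoopB a b (k+1) t = pvLoopB (x :: r) (y :: s') k (y + 100) := by
          simp [pvLoopB, ha, hb]
        rw [hrec]
        refine ih (x :: r) (y :: s') (y + 100) (by omega) ?_ ?_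
        · intro s hs
          rw [hA s (by omega), ← ha, pvDropWhile_dropWhile a t s (by omega)]
        · intro s hs
          rw [hB s (by omega), ← hb, pvDropWhile_dropWhile b (x + 100) s (by omega)]

-- ===== VERDICT (by name: the statement is the Claim_ definition above) =====
theorem flight_time_spec : Claim_equal_flight_time := by
  intro a2b b2a n _
  unfold Spec_flight_time flight_time flight_time_alt
  have hlen : (PySem.List.pyRange 0 n 1).length = n.toNat := by
    rw [PySem.List.length_pyRange_one]; omega
  rw [pvFoldl_const_eq_iterate, hlen]
  refine (pvLoopB_eq_iterate n.toNat _ _ _ _ 0 ?_ ?_ le_rfl (fun _ _ => rfl) (fun _ _ => rfl)).symm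
  · simpa using PySem.List.sorted_pairwise a2b (fun x => x)
  · simpa using PySem.List.sorted_pairwise b2a (fun x => x)
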